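-- pv_equiv track=rewrite | github.com/JawadKotaichh/Codeforces | Divisions/Div 2/Div 2 978/t.py | Karl
-- ===== SOURCE A (Python) =====
-- import heapq
--
-- def Karl(numberOfModels, x, numOfCarsPerModel):
--     max_heap = [-cars for cars in numOfCarsPerModel]
--     heapq.heapify(max_heap)
--
--     minPeople = 0
--     while max_heap:
--         if len(max_heap) >= x:
--             largest_x = [-heapq.heappop(max_heap) for _ in range(x)]
--             min_value = largest_x[-1]
--             minPeople += min_value
--
--             for elem in largest_x:
--                 remaining = elem - min_value
--                 if remaining > 0:
--                     heapq.heappush(max_heap, -remaining)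
--         else:
--             min_value = -heapq.heappop(max_heap)
--             minPeople += min_value
--             break
--
--     return minPeople
-- ===== SOURCE B (Python) =====
-- def merge_groups(a, b):
--     # merge two descending (value, count) group lists, adding counts of equal values
--     out = []
--     i = j = 0
--     while i < len(a) and j < len(b):
--         if b[j][0] < a[i][0]:
--             out.append(a[i]); i += 1
--         elif a[i][0] < b[j][0]:
--             out.append(b[j]); j += 1
--         else:
--             out.append((a[i][0], a[i][1] + b[j][1])); i += 1; j += 1
--     out.extend(a[i:])
--     out.extend(b[j:])
--     return out
--
-- def split_pivot(groups, x):
--     # locate the group holding the x-th largest element; returns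
--     # (groups strictly above it, its value m, how many of its copies are consumed,
--     #  the groups that survive below, i.e. leftover copies of m plus the tail)
--     cum = 0
--     i = 0
--     while cum + groups[i][1] < x:
--         cum += groups[i][1]
--         i += 1
--     m = groups[i][0]
--     k = x - cum
--     rest = ([(m, groups[i][1] - k)] if groups[i][1] > k else []) + groups[i + 1:]
--     return groups[:i], m, k, rest
--
-- def Karl(numberOfModels, x, numOfCarsPerModel):
--     if not numOfCarsPerModel:
--         return 0
--     # run-length encode the values in descending order
--     vals = sorted(numOfCarsPerModel, reverse=True)
--     groups = []
--     cur = vals[0]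
--     c = 1
--     for v in vals[1:]:
--         if v == cur:
--             c += 1
--         else:
--             groups.append((cur, c))
--             cur = v
--             c = 1
--     groups.append((cur, c))
--
--     total = sum(numOfCarsPerModel)
--     count = len(numOfCarsPerModel)
--     while count >= x:
--         v0, c0 = groups[0]
--         if c0 >= x:
--             # the top x are all equal: each round wipes x copies of v0;
--             # collapse q = c0 // x such rounds at once
--             q = c0 // x
--             if q * x == c0:
--                 groups = groups[1:]
--             else:
--                 groups = [(v0, c0 - q * x)] + groups[1:]
--             count -= q * x
--         else:
--             above, m, k, rest = split_pivot(groups, x)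
--             reduced = [(g[0] - m, g[1]) for g in above]
--             groups = merge_groups(reduced, rest)
--             count -= k
--     # sum conservation: every full round removed exactly x copies' worth, x*m,
--     # so the rounds contributed (total - residual) / x; plus the final popped max
--     residual = sum(v * c for v, c in groups)
--     return (total - residual) // x + (groups[0][0] if groups else 0)
-- ===== Notes on version B (the rewrite author's own statement) =====
-- stated objective: alternative
-- what changed: B replaces A's max-heap simulation (heapify, x single-element heappops and pushes per round) by a run-length-encoded (value,count) state over the sorted values, collapsing a run of >= x equal maxima into floor(count/x) rounds in one O(1) step, and recovers the answer from sum conservation ((total - residual) // x plus the final max) instead of accumulating per round.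
-- outside the precondition, e.g. on Karl(2, 0, [3, 1]): A raises IndexError, B raises ZeroDivisionError
import Mathlib
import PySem

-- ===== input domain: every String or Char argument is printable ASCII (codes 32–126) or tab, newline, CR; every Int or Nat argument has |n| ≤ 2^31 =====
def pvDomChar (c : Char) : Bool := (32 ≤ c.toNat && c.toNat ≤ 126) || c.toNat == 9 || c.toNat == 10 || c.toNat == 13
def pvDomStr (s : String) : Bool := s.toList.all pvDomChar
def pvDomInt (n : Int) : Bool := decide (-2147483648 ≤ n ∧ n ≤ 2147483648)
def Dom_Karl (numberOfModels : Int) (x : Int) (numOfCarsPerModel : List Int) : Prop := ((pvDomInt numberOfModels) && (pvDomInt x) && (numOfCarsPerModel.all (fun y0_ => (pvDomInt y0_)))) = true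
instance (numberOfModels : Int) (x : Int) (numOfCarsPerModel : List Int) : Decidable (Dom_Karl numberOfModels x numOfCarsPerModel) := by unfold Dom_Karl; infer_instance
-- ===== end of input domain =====

-- B replaces A's per-element max-heap rounds by a run-length-encoded (value,count) simulation that collapses runs of equal maxima into one batched step and recovers the total from sum conservation (objective: alternative).


-- ===== PORT A =====
-- heapq is ported as an extract-min priority queue on a plain list: heappop returns the minimum
-- element (exact: heapq.heappop always returns the minimum VALUE; only values reach A's result),
-- heapify is the identity on the multiset, heappush prepends.
def popMin (l : List Int) : Int × List Int :=
  match h : PySem.List.min? l (fun v => v) with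
  | none => (0, l)          -- unreachable: A only pops a nonempty heap
  | some m => (m, (PySem.List.remove? l m).getD l)

-- largest_x = [-heappop(max_heap) for _ in range(x)]
def popN : Nat → List Int → List Int × List Int
  | 0, h => ([], h)
  | n + 1, h =>
    let p := popMin h
    let q := popN n p.2
    ((-p.1) :: q.1, q.2)

-- the 'while max_heap' loop; fuel = initial length + 1 (each full round drops at least one element)
def karlLoop (x : Int) : Nat → List Int → Int → Int
  | 0, _, acc => acc
  | f + 1, heap, acc =>
    if heap = [] then acc
    else if x ≤ (heap.length : Int) then
      let p := popN x.toNat heap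
      let m := (PySem.List.pyGet? p.1 (-1)).getD 0   -- largest_x[-1]; IndexError (x ≤ 0) excluded by Pre_
      let h2 := p.1.foldl (fun hh e => if 0 < e - m then (-(e - m)) :: hh else hh) p.2
      karlLoop x f h2 (acc + m)
    else
      acc + (-(popMin heap).1)                        -- pop the max, add it, break

def Karl (numberOfModels : Int) (x : Int) (numOfCarsPerModel : List Int) : Int :=
  karlLoop x (numOfCarsPerModel.length + 1) (numOfCarsPerModel.map (fun cars => -cars)) 0

-- ===== PORT B =====
-- Source B's merge_groups: merge two descending (value,count) lists, adding counts of equal values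
def mgAux (a0 : Int × Int) (a : List (Int × Int)) (f : List (Int × Int) → List (Int × Int)) :
    List (Int × Int) → List (Int × Int)
  | [] => a0 :: a
  | b0 :: b =>
    if b0.1 < a0.1 then a0 :: f (b0 :: b)
    else if a0.1 < b0.1 then b0 :: mgAux a0 a f b
    else (a0.1, a0.2 + b0.2) :: f b

def mergeGroups : List (Int × Int) → List (Int × Int) → List (Int × Int)
  | [], b => b
  | a0 :: a, b => mgAux a0 a (mergeGroups a) b

-- Source B's split_pivot: walk the groups until the cumulative count reaches x
def splitPivot (x : Int) : List (Int × Int) → List (Int × Int) × Int × Int × List (Int × Int)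
  | [] => ([], 0, 0, [])   -- unreachable: only called with x ≤ total count
  | g :: gs =>
    if g.2 < x then
      let r := splitPivot (x - g.2) gs
      (g :: r.1, r.2.1, r.2.2.1, r.2.2.2)
    else
      ([], g.1, x, if x < g.2 then (g.1, g.2 - x) :: gs else gs)

-- Source B's run-length encoder over the descending sorted values
def rleAux (cur c : Int) : List Int → List (Int × Int)
  | [] => [(cur, c)]
  | v :: rest => if v = cur then rleAux cur (c + 1) rest else (cur, c) :: rleAux v 1 rest

-- Source B's 'while count >= x' loop; fuel = initial length + 1 (count drops every iteration)
def bLoop (x : Int) : Nat → List (Int × Int) → Int → List (Int × Int)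
  | 0, gs, _ => gs
  | f + 1, gs, count =>
    if x ≤ count then
      match gs with
      | [] => []   -- unreachable: count equals the number of encoded elements
      | (v0, c0) :: rest =>
        if x ≤ c0 then
          let q := PySem.Int.floordiv c0 x
          bLoop x f (if q * x = c0 then rest else (v0, c0 - q * x) :: rest) (count - q * x)
        else
          let p := splitPivot x ((v0, c0) :: rest)
          bLoop x f (mergeGroups (p.1.map (fun g => (g.1 - p.2.1, g.2))) p.2.2.2)
            (count - p.2.2.1)
    else gs

def Karl_alt (numberOfModels : Int) (x : Int) (numOfCarsPerModel : List Int) : Int :=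
  match PySem.List.sorted numOfCarsPerModel (fun v => v) true with
  | [] => 0
  | v :: vs =>
    let res := bLoop x (numOfCarsPerModel.length + 1) (rleAux v 1 vs)
      (numOfCarsPerModel.length : Int)
    PySem.Int.floordiv (numOfCarsPerModel.sum - (res.map (fun g => g.1 * g.2)).sum) x +
      (match res with | [] => 0 | g :: _ => g.1)

-- ===== PRECONDITION & SPEC =====
-- Pre_ excludes only x ≤ 0 with a nonempty list, where A raises IndexError (largest_x[-1] on []).
def Pre_Karl (numberOfModels : Int) (x : Int) (numOfCarsPerModel : List Int) : Prop :=
  numOfCarsPerModel = [] ∨ 1 ≤ x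
instance (numberOfModels : Int) (x : Int) (numOfCarsPerModel : List Int) : Decidable (Pre_Karl numberOfModels x numOfCarsPerModel) := by unfold Pre_Karl; infer_instance

def pvWitness_Karl : Int × Int × List Int := (4, 2, [7, 4, 1, 1])

def Spec_Karl (numberOfModels : Int) (x : Int) (numOfCarsPerModel : List Int) (out : Int) : Prop := out = Karl_alt numberOfModels x numOfCarsPerModel
instance (numberOfModels : Int) (x : Int) (numOfCarsPerModel : List Int) (out : Int) : Decidable (Spec_Karl numberOfModels x numOfCarsPerModel out) := by unfold Spec_Karl; infer_instance

-- ===== CLAIM (what is proved, stated in full; the proofs are below) =====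
def Claim_equal_Karl : Prop := ∀ (numberOfModels : Int) (x : Int) (numOfCarsPerModel : List Int), Dom_Karl numberOfModels x numOfCarsPerModel → Pre_Karl numberOfModels x numOfCarsPerModel → Spec_Karl numberOfModels x numOfCarsPerModel (Karl numberOfModels x numOfCarsPerModel)

-- ===== LEMMAS AND PROOFS =====

-- ---------- proof-side reference: one descending sorted list, one round at a time ----------
def mergeAux (a₀ : Int) (a : List Int) (f : List Int → List Int) : List Int → List Int
  | [] => a₀ :: a
  | b₀ :: b => if b₀ ≤ a₀ then a₀ :: f (b₀ :: b) else b₀ :: mergeAux a₀ a f b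

def mergeDesc : List Int → List Int → List Int
  | [], b => b
  | a₀ :: a, b => mergeAux a₀ a (mergeDesc a) b

def refLoop (x : Int) : Nat → List Int → Int → Int
  | 0, _, acc => acc
  | f + 1, vals, acc =>
    if vals = [] then acc
    else if (vals.length : Int) < x then acc + vals.headI
    else
      let n := x.toNat
      let m := vals.getD (n - 1) 0
      refLoop x f
        (mergeDesc (((vals.take n).filter (fun u => decide (0 < u - m))).map (fun u => u - m))
          (vals.drop n)) (acc + m)

-- ---------- RLE vocabulary ----------
def decodeG (gs : List (Int × Int)) : List Int := gs.flatMap (fun g => List.replicate g.2.toNat g.1)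
def cntG (gs : List (Int × Int)) : Int := (gs.map (fun g => g.2)).sum
def gvalG (gs : List (Int × Int)) : Int := (gs.map (fun g => g.1 * g.2)).sum
def hd0G : List (Int × Int) → Int
  | [] => 0
  | g :: _ => g.1
def GoodG (gs : List (Int × Int)) : Prop :=
  gs.Pairwise (fun p q => q.1 < p.1) ∧ ∀ g ∈ gs, 1 ≤ g.2

-- proof-side accumulating twin of bLoop (same branches, also tracks A's running total)
def bAcc (x : Int) : Nat → List (Int × Int) → Int → Int → Int
  | 0, gs, _, acc => acc + hd0G gs
  | f + 1, gs, count, acc =>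
    if x ≤ count then
      match gs with
      | [] => acc
      | (v0, c0) :: rest =>
        if x ≤ c0 then
          let q := PySem.Int.floordiv c0 x
          bAcc x f (if q * x = c0 then rest else (v0, c0 - q * x) :: rest) (count - q * x)
            (acc + q * v0)
        else
          let p := splitPivot x ((v0, c0) :: rest)
          bAcc x f (mergeGroups (p.1.map (fun g => (g.1 - p.2.1, g.2))) p.2.2.2)
            (count - p.2.2.1) (acc + p.2.1)
    else acc + hd0G gs

theorem decodeG_cons (v c : Int) (t : List (Int × Int)) :
    decodeG ((v, c) :: t) = List.replicate c.toNat v ++ decodeG t := by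
  simp [decodeG]

theorem cntG_cons (g : Int × Int) (t : List (Int × Int)) : cntG (g :: t) = g.2 + cntG t := by
  simp [cntG]

theorem gvalG_cons (g : Int × Int) (t : List (Int × Int)) :
    gvalG (g :: t) = g.1 * g.2 + gvalG t := by
  simp [gvalG]

theorem decodeG_cons' (g : Int × Int) (t : List (Int × Int)) :
    decodeG (g :: t) = List.replicate g.2.toNat g.1 ++ decodeG t := by
  simp [decodeG]

theorem head_repl_le (b a : Int) (cn : Nat) (hcn : 1 ≤ cn) (tb : List Int) (hba : b ≤ a) :
    ∀ b0' bt, (List.replicate cn b ++ tb) = b0' :: bt → b0' ≤ a := by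
  intro b0' bt h
  rcases cn with _ | cn
  · omega
  · rw [List.replicate_succ, List.cons_append] at h
    injection h with h1 _
    omega

theorem len_decodeG : ∀ (gs : List (Int × Int)), (∀ g ∈ gs, 1 ≤ g.2) →
    ((decodeG gs).length : Int) = cntG gs := by
  intro gs
  induction gs with
  | nil => intro _; simp [decodeG, cntG]
  | cons g t ih =>
    intro h
    have h1 : 1 ≤ g.2 := h g (by simp)
    have := ih (fun y hy => h y (by simp [hy]))
    rw [show g = (g.1, g.2) from rfl, decodeG_cons, cntG_cons]
    simp only [List.length_append, List.length_replicate]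
    push_cast
    omega

theorem sum_decodeG : ∀ (gs : List (Int × Int)), (∀ g ∈ gs, 1 ≤ g.2) →
    (decodeG gs).sum = gvalG gs := by
  intro gs
  induction gs with
  | nil => intro _; simp [decodeG, gvalG]
  | cons g t ih =>
    intro h
    have h1 : 1 ≤ g.2 := h g (by simp)
    have ih' := ih (fun y hy => h y (by simp [hy]))
    rw [show g = (g.1, g.2) from rfl, decodeG_cons, gvalG_cons, List.sum_append, ih',
      List.sum_replicate]
    have : ((g.2.toNat : Int)) = g.2 := by omega
    rw [nsmul_eq_mul]
    rw [this]
    ring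

theorem mem_decodeG : ∀ (gs : List (Int × Int)) (u : Int), u ∈ decodeG gs → ∃ g ∈ gs, u = g.1 := by
  intro gs
  induction gs with
  | nil => intro u h; simp [decodeG] at h
  | cons g t ih =>
    intro u h
    rw [show g = (g.1, g.2) from rfl, decodeG_cons] at h
    rcases List.mem_append.mp h with h | h
    · exact ⟨g, by simp, (List.eq_of_mem_replicate h)⟩
    · obtain ⟨g', hg', he⟩ := ih u h
      exact ⟨g', by simp [hg'], he⟩

theorem cntG_nonneg (gs : List (Int × Int)) (h : ∀ g ∈ gs, 1 ≤ g.2) : 0 ≤ cntG gs := by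
  induction gs with
  | nil => simp [cntG]
  | cons g t ih =>
    have h1 : 1 ≤ g.2 := h g (by simp)
    have := ih (fun y hy => h y (by simp [hy]))
    rw [cntG_cons]
    omega

-- ---------- A-side lemmas (heap = multiset of negated values) ----------
theorem mergeDesc_nil_right (a : List Int) : mergeDesc a [] = a := by
  cases a <;> simp [mergeDesc, mergeAux]

theorem mergeDesc_cons_cons (a₀ b₀ : Int) (a b : List Int) :
    mergeDesc (a₀ :: a) (b₀ :: b) =
      if b₀ ≤ a₀ then a₀ :: mergeDesc a (b₀ :: b) else b₀ :: mergeDesc (a₀ :: a) b := by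
  simp [mergeDesc, mergeAux]

theorem popMin_spec (l : List Int) (hl : l ≠ []) :
    (popMin l).1 ∈ l ∧ (∀ y ∈ l, (popMin l).1 ≤ y) ∧ (popMin l).2 = l.erase (popMin l).1 := by
  unfold popMin
  rcases hm : PySem.List.min? l (fun v => v) with _ | m
  · exact absurd ((PySem.List.min?_eq_none_iff l (fun v => v)).mp hm) hl
  · have hmem : m ∈ l := PySem.List.min?_mem hm
    have hmin : ∀ y ∈ l, m ≤ y := by
      intro y hy; exact PySem.List.min?_isMin hm y hy
    refine ⟨hmem, hmin, ?_⟩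
    simp [PySem.List.remove?_eq_some_erase l m hmem]

theorem mergeDesc_perm (a b : List Int) : (mergeDesc a b).Perm (a ++ b) := by
  induction a generalizing b with
  | nil => simp [mergeDesc]
  | cons a₀ a iha =>
    induction b with
    | nil => simp [mergeDesc_nil_right]
    | cons b₀ b ihb =>
      rw [mergeDesc_cons_cons]
      split
      · exact (iha (b₀ :: b)).cons a₀
      · exact (ihb.cons b₀).trans List.perm_middle.symm

theorem mergeDesc_pairwise (a : List Int) : ∀ (b : List Int),
    a.Pairwise (fun p q : Int => q ≤ p) → b.Pairwise (fun p q : Int => q ≤ p) →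
    (mergeDesc a b).Pairwise (fun p q : Int => q ≤ p) := by
  induction a with
  | nil => intro b _ hb; simpa [mergeDesc] using hb
  | cons a₀ a iha =>
    intro b
    induction b with
    | nil => intro ha _; simpa [mergeDesc_nil_right] using ha
    | cons b₀ b ihb =>
      intro ha hb
      obtain ⟨ha1, ha2⟩ := List.pairwise_cons.mp ha
      obtain ⟨hb1, hb2⟩ := List.pairwise_cons.mp hb
      rw [mergeDesc_cons_cons]
      split
      · rename_i hba
        refine List.pairwise_cons.mpr ⟨?_, iha (b₀ :: b) ha2 hb⟩
        intro y hy
        have hy' : y ∈ a ++ b₀ :: b := (mergeDesc_perm a (b₀ :: b)).mem_iff.mp hy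
        rcases List.mem_append.mp hy' with h | h
        · exact ha1 y h
        · rcases List.mem_cons.mp h with rfl | h
          · exact hba
          · exact le_trans (hb1 y h) hba
      · rename_i hba
        have hab : a₀ ≤ b₀ := by omega
        refine List.pairwise_cons.mpr ⟨?_, ihb ha hb2⟩
        intro y hy
        have hy' : y ∈ (a₀ :: a) ++ b := (mergeDesc_perm (a₀ :: a) b).mem_iff.mp hy
        rcases List.mem_append.mp hy' with h | h
        · rcases List.mem_cons.mp h with rfl | h
          · exact hab
          · exact le_trans (ha1 y h) hab
        · exact hb1 y h

theorem popMin_top (v : Int) (vs heap : List Int)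
    (hp : heap.Perm ((v :: vs).map (fun u => -u)))
    (hs : (v :: vs).Pairwise (fun p q : Int => q ≤ p)) :
    (popMin heap).1 = -v ∧ (popMin heap).2.Perm (vs.map (fun u => -u)) := by
  have hne : heap ≠ [] := by
    intro h; subst h
    exact absurd hp.symm.eq_nil (by simp)
  obtain ⟨hmem, hmin, herase⟩ := popMin_spec heap hne
  rw [List.pairwise_cons] at hs
  have hle : (popMin heap).1 ≤ -v := hmin _ (hp.mem_iff.mpr (by simp))
  have hge : -v ≤ (popMin heap).1 := by
    have := hp.mem_iff.mp hmem
    simp only [List.map_cons, List.mem_cons, List.mem_map] at this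
    rcases this with h | ⟨u, hu, h⟩
    · omega
    · have := hs.1 u hu; omega
  have hv : (popMin heap).1 = -v := le_antisymm hle hge
  refine ⟨hv, ?_⟩
  rw [herase, hv]
  have := hp.erase (-v)
  simpa using this

theorem popN_spec (k : Nat) : ∀ (heap vals : List Int),
    heap.Perm (vals.map (fun v => -v)) → vals.Pairwise (fun p q : Int => q ≤ p) →
    k ≤ vals.length →
    (popN k heap).1 = vals.take k ∧ (popN k heap).2.Perm ((vals.drop k).map (fun v => -v)) := by
  induction k with
  | zero => intro heap vals hp _ _; simpa [popN] using hp
  | succ k ih =>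
    intro heap vals hp hs hk
    rcases vals with _ | ⟨v, vs⟩
    · simp at hk
    · obtain ⟨h1, h2⟩ := popMin_top v vs heap hp hs
      obtain ⟨ih1, ih2⟩ := ih (popMin heap).2 vs h2 (List.Pairwise.of_cons hs) (by simpa using hk)
      constructor
      · simp [popN, ih1, h1]
      · simpa [popN] using ih2

theorem foldl_push_perm (m : Int) : ∀ (l acc : List Int),
    (l.foldl (fun hh e => if 0 < e - m then (-(e - m)) :: hh else hh) acc).Perm
      (acc ++ (l.filter (fun e => decide (0 < e - m))).map (fun e => -(e - m))) := by
  intro l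
  induction l with
  | nil => intro acc; simp
  | cons e t ih =>
    intro acc
    by_cases he : 0 < e - m
    · simp only [List.foldl_cons, List.filter_cons, he, decide_true]
      exact (ih _).trans List.perm_middle.symm
    · simp only [List.foldl_cons, List.filter_cons, he, decide_false]
      exact ih acc

-- A's heap loop equals the reference loop on the descending sorted values
theorem loop_eq (x : Int) (hx : 1 ≤ x) : ∀ (f : Nat) (heap vals : List Int) (acc : Int),
    heap.Perm (vals.map (fun v => -v)) → vals.Pairwise (fun p q : Int => q ≤ p) →
    vals.length < f →
    karlLoop x f heap acc = refLoop x f vals acc := by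
  intro f
  induction f with
  | zero => intro heap vals acc _ _ h; omega
  | succ f ih =>
    intro heap vals acc hp hs hf
    rcases vals with _ | ⟨v, vs⟩
    · have h0 : heap.Perm ([] : List Int) := by simpa using hp
      have hnil : heap = [] := h0.eq_nil
      subst hnil
      simp [karlLoop, refLoop]
    · set vals := v :: vs with hvals
      have hne : heap ≠ [] := by
        intro h
        rw [h] at hp
        have h2 := hp.symm.eq_nil
        simp [hvals] at h2
      have hlen : heap.length = vals.length := by
        rw [hp.length_eq, List.length_map]
      have hvne : vals ≠ [] := by simp [hvals]
      by_cases hx2 : x ≤ (heap.length : Int)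
      · -- full round
        have hx2' : ¬ ((vals.length : Int) < x) := by omega
        set n := x.toNat with hn
        have hn1 : 1 ≤ n := by omega
        have hnle : n ≤ vals.length := by omega
        have hxn : (n : Int) = x := by omega
        obtain ⟨hp1, hp2⟩ := popN_spec n heap vals hp hs hnle
        have hidx : n - 1 < vals.length := by omega
        set m := vals[n - 1] with hm
        -- A's x-th largest
        have hmA : (PySem.List.pyGet? (popN n heap).1 (-1)).getD 0 = m := by
          rw [hp1, PySem.List.pyGet?_neg_one, List.getLast?_eq_getElem?, List.getElem?_take,
            List.length_take]
          have h1 : min n vals.length = n := by omega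
          rw [h1]
          simp only [if_pos (by omega : n - 1 < n)]
          rw [List.getElem?_eq_getElem hidx]
          rfl
        -- the reference loop's vals[x-1]
        have hmB : vals.getD (n - 1) 0 = m := by
          rw [List.getD_eq_getElem?_getD, List.getElem?_eq_getElem hidx]
          rfl
        set filt := (vals.take n).filter (fun e => decide (0 < e - m)) with hfilt
        set reduced := filt.map (fun v => v - m) with hred
        set newvals := mergeDesc reduced (vals.drop n) with hnew
        -- A's new heap is a permutation of the negation of the reference's new list
        have hmapmap : reduced.map (fun u => -u) = filt.map (fun e => -(e - m)) := by
          rw [hred, List.map_map]; rfl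
        have hperm2 : ((popN n heap).1.foldl
            (fun hh e => if 0 < e - m then (-(e - m)) :: hh else hh) (popN n heap).2).Perm
            (newvals.map (fun u => -u)) := by
          refine ((foldl_push_perm m _ _).trans ?_).trans
            (((mergeDesc_perm reduced (vals.drop n)).map (fun u => -u)).symm)
          rw [List.map_append, hmapmap, hp1, ← hfilt]
          exact (hp2.append (List.Perm.refl _)).trans List.perm_append_comm
        -- the reference's new list is descending
        have hpair2 : newvals.Pairwise (fun p q : Int => q ≤ p) := by
          refine mergeDesc_pairwise reduced (vals.drop n) ?_ (hs.drop)
          rw [hred, List.pairwise_map]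
          exact (hs.take.filter _).imp (by intro a b h; omega)
        -- the round drops at least one element
        have hflt : filt.length < n := by
          have hmem : m ∈ vals.take n := by
            have h1 : n - 1 < (vals.take n).length := by
              rw [List.length_take]; omega
            have h2 : (vals.take n)[n - 1] = m := by rw [List.getElem_take]
            exact h2 ▸ List.getElem_mem h1
          have : filt.length < (vals.take n).length := by
            rw [hfilt]
            exact List.length_filter_lt_length_iff_exists.mpr ⟨m, hmem, by simp⟩
          have h3 : (vals.take n).length = n := by rw [List.length_take]; omega
          omega
        have hlen2 : newvals.length < f := by
          have h1 : newvals.length = reduced.length + (vals.drop n).length := by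
            rw [hnew, (mergeDesc_perm reduced (vals.drop n)).length_eq, List.length_append]
          rw [hred, List.length_map] at h1
          rw [List.length_drop] at h1
          omega
        -- step both loops and apply the induction hypothesis
        show (if heap = [] then acc else
          if x ≤ (heap.length : Int) then _ else _) = (if vals = [] then acc else
          if (vals.length : Int) < x then _ else _)
        rw [if_neg hne, if_neg hvne, if_pos hx2, if_neg hx2']
        simp only [← hn]
        simp only [hmA, hmB, ← hfilt, ← hred, ← hnew]
        exact ih _ newvals (acc + m) hperm2 hpair2 hlen2
      · -- final pop-and-break round
        have hx2' : (vals.length : Int) < x := by omega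
        have hpop : (popMin heap).1 = -v := (popMin_top v vs heap hp hs).1
        show (if heap = [] then acc else
          if x ≤ (heap.length : Int) then _ else _) = (if vals = [] then acc else
          if (vals.length : Int) < x then _ else _)
        rw [if_neg hne, if_neg hvne, if_neg hx2, if_pos hx2']
        rw [hpop]
        simp [hvals]

-- ---------- B-side lemmas ----------
theorem mergeGroups_nil_right (a : List (Int × Int)) : mergeGroups a [] = a := by
  cases a <;> simp [mergeGroups, mgAux]

theorem mergeGroups_cons_cons (a0 b0 : Int × Int) (a b : List (Int × Int)) :
    mergeGroups (a0 :: a) (b0 :: b) =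
      if b0.1 < a0.1 then a0 :: mergeGroups a (b0 :: b)
      else if a0.1 < b0.1 then b0 :: mergeGroups (a0 :: a) b
      else (a0.1, a0.2 + b0.2) :: mergeGroups a b := by
  simp [mergeGroups, mgAux]

theorem cntG_mergeGroups : ∀ (a b : List (Int × Int)), cntG (mergeGroups a b) = cntG a + cntG b := by
  intro a
  induction a with
  | nil => intro b; simp [mergeGroups, cntG]
  | cons a0 ta iha =>
    intro b
    induction b with
    | nil => simp [mergeGroups_nil_right, cntG]
    | cons b0 tb ihb =>
      rw [mergeGroups_cons_cons]
      split
      · simp only [cntG_cons, iha]; ring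
      · split
        · simp only [cntG_cons, ihb, cntG_cons]; ring
        · simp only [cntG_cons, iha]; ring

theorem gvalG_mergeGroups : ∀ (a b : List (Int × Int)),
    gvalG (mergeGroups a b) = gvalG a + gvalG b := by
  intro a
  induction a with
  | nil => intro b; simp [mergeGroups, gvalG]
  | cons a0 ta iha =>
    intro b
    induction b with
    | nil => simp [mergeGroups_nil_right, gvalG]
    | cons b0 tb ihb =>
      rw [mergeGroups_cons_cons]
      split
      · simp only [gvalG_cons, iha]; ring
      · split
        · simp only [gvalG_cons, ihb, gvalG_cons]; ring
        · rename_i h1 h2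
          have heq : a0.1 = b0.1 := by omega
          simp only [gvalG_cons, iha]
          rw [heq]
          ring

theorem mergeGroups_val_sub : ∀ (a b : List (Int × Int)) (g : Int × Int),
    g ∈ mergeGroups a b → (∃ h ∈ a, g.1 = h.1) ∨ (∃ h ∈ b, g.1 = h.1) := by
  intro a
  induction a with
  | nil => intro b g h; right; exact ⟨g, by simpa [mergeGroups] using h, rfl⟩
  | cons a0 ta iha =>
    intro b
    induction b with
    | nil =>
      intro g h
      left; exact ⟨g, by simpa [mergeGroups_nil_right] using h, rfl⟩
    | cons b0 tb ihb =>
      intro g h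
      rw [mergeGroups_cons_cons] at h
      split at h
      · rcases List.mem_cons.mp h with rfl | h
        · left; exact ⟨g, by simp, rfl⟩
        · rcases iha (b0 :: tb) g h with ⟨h', hm, he⟩ | ⟨h', hm, he⟩
          · exact Or.inl ⟨h', by simp [hm], he⟩
          · exact Or.inr ⟨h', hm, he⟩
      · split at h
        · rcases List.mem_cons.mp h with rfl | h
          · right; exact ⟨g, by simp, rfl⟩
          · rcases ihb g h with ⟨h', hm, he⟩ | ⟨h', hm, he⟩
            · exact Or.inl ⟨h', hm, he⟩
            · exact Or.inr ⟨h', by simp [hm], he⟩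
        · rcases List.mem_cons.mp h with rfl | h
          · left; exact ⟨a0, by simp, rfl⟩
          · rcases iha tb g h with ⟨h', hm, he⟩ | ⟨h', hm, he⟩
            · exact Or.inl ⟨h', by simp [hm], he⟩
            · exact Or.inr ⟨h', by simp [hm], he⟩

theorem GoodG_mergeGroups : ∀ (a b : List (Int × Int)), GoodG a → GoodG b →
    GoodG (mergeGroups a b) := by
  intro a
  induction a with
  | nil => intro b _ hb; simpa [mergeGroups] using hb
  | cons a0 ta iha =>
    intro b
    induction b with
    | nil => intro ha _; simpa [mergeGroups_nil_right] using ha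
    | cons b0 tb ihb =>
      intro ha hb
      obtain ⟨hap, hac⟩ := ha
      obtain ⟨hbp, hbc⟩ := hb
      obtain ⟨ha1, ha2⟩ := List.pairwise_cons.mp hap
      obtain ⟨hb1, hb2⟩ := List.pairwise_cons.mp hbp
      rw [mergeGroups_cons_cons]
      split
      · rename_i hba
        obtain ⟨hmp, hmc⟩ := iha (b0 :: tb) ⟨ha2, fun g hg => hac g (by simp [hg])⟩ ⟨hbp, hbc⟩
        refine ⟨List.pairwise_cons.mpr ⟨?_, hmp⟩, ?_⟩
        · intro g hg
          rcases mergeGroups_val_sub ta (b0 :: tb) g hg with ⟨h', hm, he⟩ | ⟨h', hm, he⟩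
          · rw [he]; exact ha1 h' hm
          · rcases List.mem_cons.mp hm with rfl | hm
            · rw [he]; exact hba
            · rw [he]; exact lt_trans (hb1 h' hm) hba
        · intro g hg
          rcases List.mem_cons.mp hg with rfl | hg
          · exact hac g (by simp)
          · exact hmc g hg
      · split
        · rename_i h1 hab
          obtain ⟨hmp, hmc⟩ := ihb ⟨hap, hac⟩ ⟨hb2, fun g hg => hbc g (by simp [hg])⟩
          refine ⟨List.pairwise_cons.mpr ⟨?_, hmp⟩, ?_⟩
          · intro g hg
            rcases mergeGroups_val_sub (a0 :: ta) tb g hg with ⟨h', hm, he⟩ | ⟨h', hm, he⟩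
            · rcases List.mem_cons.mp hm with rfl | hm
              · rw [he]; exact hab
              · rw [he]; exact lt_trans (ha1 h' hm) hab
            · rw [he]; exact hb1 h' hm
          · intro g hg
            rcases List.mem_cons.mp hg with rfl | hg
            · exact hbc g (by simp)
            · exact hmc g hg
        · rename_i h1 h2
          have heq : a0.1 = b0.1 := by omega
          obtain ⟨hmp, hmc⟩ := iha tb ⟨ha2, fun g hg => hac g (by simp [hg])⟩
            ⟨hb2, fun g hg => hbc g (by simp [hg])⟩
          refine ⟨List.pairwise_cons.mpr ⟨?_, hmp⟩, ?_⟩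
          · intro g hg
            rcases mergeGroups_val_sub ta tb g hg with ⟨h', hm, he⟩ | ⟨h', hm, he⟩
            · rw [he]; exact ha1 h' hm
            · rw [he]; dsimp only; rw [heq]; exact hb1 h' hm
          · intro g hg
            rcases List.mem_cons.mp hg with rfl | hg
            · have := hac a0 (by simp)
              have := hbc b0 (by simp)
              dsimp only
              omega
            · exact hmc g hg

-- peel a replicate prefix off the LEFT argument of mergeDesc
theorem mergeDesc_peel_left : ∀ (cn : Nat) (a : Int) (ta r : List Int),
    (∀ b0 bt, r = b0 :: bt → b0 ≤ a) →
    mergeDesc (List.replicate cn a ++ ta) r = List.replicate cn a ++ mergeDesc ta r := by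
  intro cn
  induction cn with
  | zero => intro a ta r _; simp
  | succ cn ih =>
    intro a ta r hr
    rcases r with _ | ⟨b0, bt⟩
    · simp [mergeDesc_nil_right]
    · have hba : b0 ≤ a := hr b0 bt rfl
      rw [List.replicate_succ, List.cons_append, mergeDesc_cons_cons, if_pos hba, ih a ta _ hr]
      simp

-- peel a replicate prefix off the RIGHT argument of mergeDesc
theorem mergeDesc_peel_right : ∀ (cn : Nat) (b : Int) (tb l : List Int),
    (∀ y ∈ l, y < b) →
    mergeDesc l (List.replicate cn b ++ tb) = List.replicate cn b ++ mergeDesc l tb := by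
  intro cn
  induction cn with
  | zero => intro b tb l _; simp
  | succ cn ih =>
    intro b tb l hl
    rcases l with _ | ⟨a0, at'⟩
    · simp [mergeDesc]
    · have hab : ¬ b ≤ a0 := by have := hl a0 (by simp); omega
      rw [List.replicate_succ, List.cons_append, mergeDesc_cons_cons, if_neg hab, ih b tb _ hl]
      simp

theorem decodeG_head (v c : Int) (ts : List (Int × Int)) (hc : 1 ≤ c) :
    ∃ t', decodeG ((v, c) :: ts) = v :: t' := by
  rw [decodeG_cons]
  have : c.toNat = (c.toNat - 1) + 1 := by omega
  rw [this, List.replicate_succ, List.cons_append]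
  exact ⟨_, rfl⟩

theorem decodeG_mergeGroups : ∀ (a b : List (Int × Int)), GoodG a → GoodG b →
    decodeG (mergeGroups a b) = mergeDesc (decodeG a) (decodeG b) := by
  intro a
  induction a with
  | nil => intro b _ _; simp [mergeGroups, decodeG, mergeDesc]
  | cons a0 ta iha =>
    intro b
    induction b with
    | nil => intro _ _; rw [mergeGroups_nil_right, show decodeG [] = [] from rfl, mergeDesc_nil_right]
    | cons b0 tb ihb =>
      intro ha hb
      obtain ⟨hap, hac⟩ := ha
      obtain ⟨hbp, hbc⟩ := hb
      obtain ⟨ha1, ha2⟩ := List.pairwise_cons.mp hap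
      obtain ⟨hb1, hb2⟩ := List.pairwise_cons.mp hbp
      have hca : 1 ≤ a0.2 := hac a0 (by simp)
      have hcb : 1 ≤ b0.2 := hbc b0 (by simp)
      have hta : GoodG ta := ⟨ha2, fun g hg => hac g (by simp [hg])⟩
      have htb : GoodG tb := ⟨hb2, fun g hg => hbc g (by simp [hg])⟩
      have hmta : ∀ y ∈ decodeG ta, y < a0.1 := by
        intro y hy
        obtain ⟨g, hg, rfl⟩ := mem_decodeG ta y hy
        exact ha1 g hg
      have hmtb : ∀ y ∈ decodeG tb, y < b0.1 := by
        intro y hy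
        obtain ⟨g, hg, rfl⟩ := mem_decodeG tb y hy
        exact hb1 g hg
      have haexp := decodeG_cons' a0 ta
      have hbexp := decodeG_cons' b0 tb
      rw [mergeGroups_cons_cons]
      split
      · rename_i hba
        have hhyp : ∀ b0' bt, decodeG (b0 :: tb) = b0' :: bt → b0' ≤ a0.1 := by
          rw [hbexp]
          exact head_repl_le b0.1 a0.1 _ (by omega) _ (le_of_lt hba)
        have hpeel := mergeDesc_peel_left a0.2.toNat a0.1 (decodeG ta) (decodeG (b0 :: tb)) hhyp
        rw [decodeG_cons' a0, iha (b0 :: tb) hta ⟨hbp, hbc⟩, haexp, hpeel]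
      · split
        · rename_i h1 hab
          have hhyp : ∀ y ∈ decodeG (a0 :: ta), y < b0.1 := by
            intro y hy
            obtain ⟨g, hg, rfl⟩ := mem_decodeG (a0 :: ta) y hy
            rcases List.mem_cons.mp hg with rfl | hg
            · exact hab
            · exact lt_trans (ha1 g hg) hab
          have hpeel := mergeDesc_peel_right b0.2.toNat b0.1 (decodeG tb) (decodeG (a0 :: ta)) hhyp
          rw [decodeG_cons' b0, ihb ⟨hap, hac⟩ htb, hbexp, hpeel]
        · rename_i h1 h2
          have heq : a0.1 = b0.1 := by omega
          have hhyp1 : ∀ b0' bt,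
              (List.replicate b0.2.toNat b0.1 ++ decodeG tb) = b0' :: bt → b0' ≤ a0.1 :=
            head_repl_le b0.1 a0.1 _ (by omega) _ (le_of_eq heq.symm)
          have hpeel1 := mergeDesc_peel_left a0.2.toNat a0.1 (decodeG ta)
            (List.replicate b0.2.toNat b0.1 ++ decodeG tb) hhyp1
          have hhyp2 : ∀ y ∈ decodeG ta, y < b0.1 := fun y hy => heq ▸ hmta y hy
          have hpeel2 := mergeDesc_peel_right b0.2.toNat b0.1 (decodeG tb) (decodeG ta) hhyp2
          rw [decodeG_cons', haexp, hbexp, hpeel1, hpeel2, iha tb hta htb]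
          have hadd : (a0.2 + b0.2).toNat = a0.2.toNat + b0.2.toNat := by omega
          dsimp only
          rw [hadd, List.replicate_add, heq, List.append_assoc]

theorem splitPivot_spec : ∀ (gs : List (Int × Int)) (x : Int), 1 ≤ x → x ≤ cntG gs →
    (∀ g ∈ gs, 1 ≤ g.2) →
    ∃ cp after, gs = (splitPivot x gs).1 ++ ((splitPivot x gs).2.1, cp) :: after ∧
      (splitPivot x gs).2.2.1 = x - cntG (splitPivot x gs).1 ∧
      1 ≤ (splitPivot x gs).2.2.1 ∧ (splitPivot x gs).2.2.1 ≤ cp ∧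
      (splitPivot x gs).2.2.2 =
        (if (splitPivot x gs).2.2.1 < cp
          then ((splitPivot x gs).2.1, cp - (splitPivot x gs).2.2.1) :: after else after) := by
  intro gs
  induction gs with
  | nil =>
    intro x hx hc _
    rw [show cntG [] = 0 from rfl] at hc
    omega
  | cons g t ih =>
    obtain ⟨gv, gc⟩ := g
    intro x hx hc hcounts
    rw [cntG_cons] at hc
    dsimp only at hc
    by_cases hg : gc < x
    · have hrec := ih (x - gc) (by omega)
        (by have := cntG_nonneg t (fun y hy => hcounts y (by simp [hy])); omega)
        (fun y hy => hcounts y (by simp [hy]))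
      obtain ⟨cp, after, he, hk, hk1, hkcp, hrest⟩ := hrec
      refine ⟨cp, after, ?_, ?_, ?_, ?_, ?_⟩
      · simp only [splitPivot, if_pos hg]
        exact congrArg ((gv, gc) :: ·) he
      · simp only [splitPivot, if_pos hg]
        rw [cntG_cons]; dsimp only; omega
      · simp only [splitPivot, if_pos hg]; exact hk1
      · simp only [splitPivot, if_pos hg]; exact hkcp
      · simp only [splitPivot, if_pos hg]; exact hrest
    · refine ⟨gc, t, ?_, ?_, ?_, ?_, ?_⟩
      all_goals simp only [splitPivot, if_neg hg]
      · simp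
      · rw [show cntG [] = 0 from rfl]; omega
      · omega
      · omega

theorem rleAux_cons (cur c v : Int) (rest : List Int) :
    rleAux cur c (v :: rest) =
      if v = cur then rleAux cur (c + 1) rest else (cur, c) :: rleAux v 1 rest := rfl

theorem rle_spec : ∀ (rest : List Int) (cur c : Int), 1 ≤ c →
    (∀ y ∈ rest, y ≤ cur) → rest.Pairwise (fun a b : Int => b ≤ a) →
    GoodG (rleAux cur c rest) ∧
      decodeG (rleAux cur c rest) = List.replicate c.toNat cur ++ rest ∧
      ∀ g ∈ rleAux cur c rest, g.1 ≤ cur := by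
  intro rest
  induction rest with
  | nil =>
    intro cur c hc _ _
    refine ⟨⟨by simp [rleAux], ?_⟩, ?_, ?_⟩
    · intro g hg
      simp only [rleAux, List.mem_singleton] at hg
      rw [hg]
      exact hc
    · simp [rleAux, decodeG]
    · intro g hg
      simp only [rleAux, List.mem_singleton] at hg
      rw [hg]
  | cons v r ih =>
    intro cur c hc hle hp
    obtain ⟨hv, hr⟩ := List.pairwise_cons.mp hp
    have hvc : v ≤ cur := hle v (by simp)
    by_cases hvc' : v = cur
    · subst hvc'
      obtain ⟨hg, hd, hb⟩ := ih v (c + 1) (by omega) (fun y hy => hv y hy) hr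
      rw [rleAux_cons, if_pos rfl]
      refine ⟨hg, ?_, hb⟩
      rw [hd]
      have : (c + 1).toNat = c.toNat + 1 := by omega
      rw [this, List.replicate_succ', List.append_assoc, List.singleton_append]
    · have hvlt : v < cur := by omega
      obtain ⟨⟨hgp, hgc⟩, hd, hb⟩ := ih v 1 (by omega) (fun y hy => hv y hy) hr
      rw [rleAux_cons, if_neg hvc']
      refine ⟨⟨List.pairwise_cons.mpr ⟨?_, hgp⟩, ?_⟩, ?_, ?_⟩
      · intro g hg
        exact lt_of_le_of_lt (hb g hg) hvlt
      · intro g hg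
        rcases List.mem_cons.mp hg with rfl | hg
        · exact hc
        · exact hgc g hg
      · rw [decodeG_cons, hd]
        norm_num
      · intro g hg
        rcases List.mem_cons.mp hg with rfl | hg
        · exact le_refl _
        · exact le_trans (hb g hg) (le_of_lt hvlt)

-- ---------- batched round: q consecutive full rounds on a run of the maximum ----------
theorem filter_replicate_not (n : Nat) (m : Int) :
    (List.replicate n m).filter (fun u => decide (0 < u - m)) = [] := by
  induction n with
  | zero => simp
  | succ n ih => rw [List.replicate_succ, List.filter_cons, ih]; simp

theorem ref_batch (x : Int) (hx : 1 ≤ x) (v0 : Int) (t : List Int) :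
    ∀ (j f : Nat) (c acc : Int), (j : Int) * x ≤ c → j ≤ f →
    refLoop x f (List.replicate c.toNat v0 ++ t) acc =
      refLoop x (f - j) (List.replicate (c - (j : Int) * x).toNat v0 ++ t) (acc + (j : Int) * v0) := by
  intro j
  induction j with
  | zero => intro f c acc _ _; simp
  | succ j ih =>
    intro f c acc hjx hjf
    have hj0 : (0 : Int) ≤ (j : Int) := by positivity
    have hjx' : ((j : Int) + 1) * x = (j : Int) * x + x := by ring
    have hjxn : (0 : Int) ≤ (j : Int) * x := mul_nonneg hj0 (by omega)
    have hjx1 : ((j + 1 : Nat) : Int) * x ≤ c := hjx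
    have hcast : ((j + 1 : Nat) : Int) = (j : Int) + 1 := by push_cast; ring
    rw [hcast] at hjx1
    have hcx : x ≤ c := by
      rw [hjx'] at hjx1
      omega
    have hc1 : 1 ≤ c := le_trans hx hcx
    rcases f with _ | f
    · omega
    set vals := List.replicate c.toNat v0 ++ t with hvalsdef
    have hvne : vals ≠ [] := by
      rw [hvalsdef]
      have : c.toNat = (c.toNat - 1) + 1 := by omega
      rw [this, List.replicate_succ]
      simp
    have hlenv : ¬ ((vals.length : Int) < x) := by
      rw [hvalsdef]
      simp only [List.length_append, List.length_replicate]
      push_cast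
      omega
    have hm : vals.getD (x.toNat - 1) 0 = v0 := by
      rw [hvalsdef, List.getD_eq_getElem?_getD, List.getElem?_append_left
        (by rw [List.length_replicate]; omega), List.getElem?_replicate]
      rw [if_pos (by omega)]
      rfl
    have htake : vals.take x.toNat = List.replicate x.toNat v0 := by
      rw [hvalsdef, List.take_append, List.take_replicate, List.length_replicate,
        min_eq_left (by omega), show x.toNat - c.toNat = 0 from by omega, List.take_zero,
        List.append_nil]
    have hdrop : vals.drop x.toNat = List.replicate (c - x).toNat v0 ++ t := by
      rw [hvalsdef, List.drop_append, List.drop_replicate, List.length_replicate,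
        show x.toNat - c.toNat = 0 from by omega, List.drop_zero,
        show c.toNat - x.toNat = (c - x).toNat from by omega]
    show (if vals = [] then acc else
      if (vals.length : Int) < x then acc + vals.headI else _) = _
    rw [if_neg hvne, if_neg hlenv]
    simp only [hm, htake, hdrop, filter_replicate_not, List.map_nil]
    rw [show mergeDesc [] (List.replicate (c - x).toNat v0 ++ t) =
      List.replicate (c - x).toNat v0 ++ t from rfl]
    rw [ih f (c - x) (acc + v0) (by rw [hjx'] at hjx1; omega) (by omega)]
    rw [hcast]
    have h1 : c - x - (j : Int) * x = c - ((j : Int) + 1) * x := by ring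
    have h2 : acc + v0 + (j : Int) * v0 = acc + ((j : Int) + 1) * v0 := by ring
    have h3 : f - j = f + 1 - (j + 1) := by omega
    rw [h1, h2, h3]

theorem decodeG_append (a b : List (Int × Int)) : decodeG (a ++ b) = decodeG a ++ decodeG b := by
  simp [decodeG]

theorem cntG_append (a b : List (Int × Int)) : cntG (a ++ b) = cntG a + cntG b := by
  simp [cntG]

theorem gvalG_append (a b : List (Int × Int)) : gvalG (a ++ b) = gvalG a + gvalG b := by
  simp [gvalG]

theorem decodeG_map_sub (m : Int) : ∀ (ab : List (Int × Int)),
    decodeG (ab.map (fun g => (g.1 - m, g.2))) = (decodeG ab).map (fun u => u - m) := by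
  intro ab
  induction ab with
  | nil => simp [decodeG]
  | cons g t ih =>
    rw [List.map_cons, decodeG_cons', decodeG_cons', List.map_append, List.map_replicate, ih]

theorem cntG_map_sub (m : Int) : ∀ (ab : List (Int × Int)),
    cntG (ab.map (fun g => (g.1 - m, g.2))) = cntG ab := by
  intro ab
  induction ab with
  | nil => rfl
  | cons g t ih => rw [List.map_cons, cntG_cons, cntG_cons, ih]

theorem gvalG_map_sub (m : Int) : ∀ (ab : List (Int × Int)),
    gvalG (ab.map (fun g => (g.1 - m, g.2))) = gvalG ab - m * cntG ab := by
  intro ab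
  induction ab with
  | nil => simp [gvalG, cntG]
  | cons g t ih =>
    rw [List.map_cons, gvalG_cons, gvalG_cons, ih, cntG_cons]
    ring

-- everything one pivot round of B preserves / computes
theorem pivot_pres (x : Int) (hx : 1 ≤ x) (gs : List (Int × Int)) (hg : GoodG gs)
    (hxc : x ≤ cntG gs) :
    GoodG (mergeGroups ((splitPivot x gs).1.map (fun g => (g.1 - (splitPivot x gs).2.1, g.2)))
        (splitPivot x gs).2.2.2) ∧
      cntG (mergeGroups ((splitPivot x gs).1.map (fun g => (g.1 - (splitPivot x gs).2.1, g.2)))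
          (splitPivot x gs).2.2.2) = cntG gs - (splitPivot x gs).2.2.1 ∧
      1 ≤ (splitPivot x gs).2.2.1 ∧ (splitPivot x gs).2.2.1 ≤ x ∧
      gvalG gs - gvalG (mergeGroups
          ((splitPivot x gs).1.map (fun g => (g.1 - (splitPivot x gs).2.1, g.2)))
          (splitPivot x gs).2.2.2) = x * (splitPivot x gs).2.1 ∧
      decodeG gs = decodeG (splitPivot x gs).1 ++
        List.replicate (splitPivot x gs).2.2.1.toNat (splitPivot x gs).2.1 ++
        decodeG (splitPivot x gs).2.2.2 ∧
      decodeG (mergeGroups ((splitPivot x gs).1.map (fun g => (g.1 - (splitPivot x gs).2.1, g.2)))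
          (splitPivot x gs).2.2.2) =
        mergeDesc ((decodeG (splitPivot x gs).1).map (fun u => u - (splitPivot x gs).2.1))
          (decodeG (splitPivot x gs).2.2.2) ∧
      cntG (splitPivot x gs).1 = x - (splitPivot x gs).2.2.1 ∧
      (∀ g ∈ (splitPivot x gs).1, (splitPivot x gs).2.1 < g.1 ∧ 1 ≤ g.2) := by
  obtain ⟨cp, after, he, hk, hk1, hkcp, hrest⟩ := splitPivot_spec gs x hx hxc hg.2
  set ab := (splitPivot x gs).1 with hab
  set m := (splitPivot x gs).2.1 with hm
  set k := (splitPivot x gs).2.2.1 with hkk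
  set rst := (splitPivot x gs).2.2.2 with hrst
  obtain ⟨hgp, hgc⟩ := hg
  rw [he] at hgp hgc
  obtain ⟨habp, hconsp, hcross⟩ := List.pairwise_append.mp hgp
  obtain ⟨haft1, haftp⟩ := List.pairwise_cons.mp hconsp
  have hab_m : ∀ g ∈ ab, m < g.1 := fun g hg => hcross g hg (m, cp) (by simp)
  have hab_c : ∀ g ∈ ab, 1 ≤ g.2 := fun g hg => hgc g (List.mem_append_left _ hg)
  have hcp1 : 1 ≤ cp := hgc (m, cp) (by simp)
  have haft_c : ∀ g ∈ after, 1 ≤ g.2 := fun g hg => hgc g (by simp [hg])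
  have hredG : GoodG (ab.map (fun g => (g.1 - m, g.2))) := by
    constructor
    · rw [List.pairwise_map]
      exact habp.imp (by intro a b h; dsimp only; omega)
    · intro g hg
      obtain ⟨g', hg', rfl⟩ := List.mem_map.mp hg
      exact hab_c g' hg'
  have hrstG : GoodG rst := by
    rw [hrest]
    by_cases hlt : k < cp
    · rw [if_pos hlt]
      refine ⟨List.pairwise_cons.mpr ⟨?_, haftp⟩, ?_⟩
      · intro g hg
        exact haft1 g hg
      · intro g hg
        rcases List.mem_cons.mp hg with rfl | hg
        · dsimp only; omega
        · exact haft_c g hg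
    · rw [if_neg hlt]
      exact ⟨haftp, haft_c⟩
  have hrd : decodeG rst = List.replicate (cp - k).toNat m ++ decodeG after := by
    rw [hrest]
    by_cases hlt : k < cp
    · rw [if_pos hlt, decodeG_cons]
    · rw [if_neg hlt, show (cp - k).toNat = 0 from by omega]
      simp
  have hcnt_rst : cntG rst = cp - k + cntG after := by
    rw [hrest]
    by_cases hlt : k < cp
    · rw [if_pos hlt, cntG_cons]
    · rw [if_neg hlt]
      have : cp - k = 0 := by omega
      omega
  have hgval_rst : gvalG rst = m * (cp - k) + gvalG after := by
    rw [hrest]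
    by_cases hlt : k < cp
    · rw [if_pos hlt, gvalG_cons]
    · rw [if_neg hlt]
      have : cp - k = 0 := by omega
      rw [this]
      ring
  have hcnt_gs : cntG gs = cntG ab + cp + cntG after := by
    rw [he, cntG_append, cntG_cons]
    ring
  have hgval_gs : gvalG gs = gvalG ab + m * cp + gvalG after := by
    rw [he, gvalG_append, gvalG_cons]
    ring
  have hd_gs : decodeG gs = decodeG ab ++ List.replicate k.toNat m ++ decodeG rst := by
    rw [he, decodeG_append, decodeG_cons, hrd]
    have h2 : cp.toNat = k.toNat + (cp - k).toNat := by omega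
    rw [h2, List.replicate_add, List.append_assoc, List.append_assoc]
  have hdm := decodeG_mergeGroups (ab.map (fun g => (g.1 - m, g.2))) rst hredG hrstG
  have hcntab : 0 ≤ cntG ab := cntG_nonneg ab hab_c
  have hcnt' : cntG (mergeGroups (ab.map (fun g => (g.1 - m, g.2))) rst) = cntG gs - k := by
    rw [cntG_mergeGroups, cntG_map_sub, hcnt_rst, hcnt_gs]
    omega
  have hxk : cntG ab + k = x := by omega
  have hgval' : gvalG gs - gvalG (mergeGroups (ab.map (fun g => (g.1 - m, g.2))) rst) = x * m := by
    rw [gvalG_mergeGroups, gvalG_map_sub, hgval_rst, hgval_gs]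
    linear_combination m * hxk
  exact ⟨GoodG_mergeGroups _ _ hredG hrstG, hcnt', hk1, by omega, hgval', hd_gs,
    by rw [hdm, decodeG_map_sub], by omega, fun g hg => ⟨hab_m g hg, hab_c g hg⟩⟩

-- ---------- the main correspondence: reference loop = B's batched RLE loop ----------
theorem bAcc_exit (x : Int) (f : Nat) (gs : List (Int × Int)) (count acc : Int)
    (h : ¬ x ≤ count) : bAcc x (f + 1) gs count acc = acc + hd0G gs := by
  simp only [bAcc]
  rw [if_neg h]

theorem bAcc_batch (x : Int) (f : Nat) (v0 c0 : Int) (rest : List (Int × Int)) (count acc : Int)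
    (h1 : x ≤ count) (h2 : x ≤ c0) :
    bAcc x (f + 1) ((v0, c0) :: rest) count acc =
      bAcc x f
        (if (PySem.Int.floordiv c0 x) * x = c0 then rest
          else (v0, c0 - (PySem.Int.floordiv c0 x) * x) :: rest)
        (count - (PySem.Int.floordiv c0 x) * x) (acc + (PySem.Int.floordiv c0 x) * v0) := by
  simp only [bAcc]
  rw [if_pos h1, if_pos h2]

theorem bAcc_pivot (x : Int) (f : Nat) (v0 c0 : Int) (rest : List (Int × Int)) (count acc : Int)
    (h1 : x ≤ count) (h2 : ¬ x ≤ c0) :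
    bAcc x (f + 1) ((v0, c0) :: rest) count acc =
      bAcc x f
        (mergeGroups ((splitPivot x ((v0, c0) :: rest)).1.map
            (fun g => (g.1 - (splitPivot x ((v0, c0) :: rest)).2.1, g.2)))
          (splitPivot x ((v0, c0) :: rest)).2.2.2)
        (count - (splitPivot x ((v0, c0) :: rest)).2.2.1)
        (acc + (splitPivot x ((v0, c0) :: rest)).2.1) := by
  simp only [bAcc]
  rw [if_pos h1, if_neg h2]

theorem bLoop_exit (x : Int) (f : Nat) (gs : List (Int × Int)) (count : Int)
    (h : ¬ x ≤ count) : bLoop x (f + 1) gs count = gs := by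
  simp only [bLoop]
  rw [if_neg h]

theorem bLoop_batch (x : Int) (f : Nat) (v0 c0 : Int) (rest : List (Int × Int)) (count : Int)
    (h1 : x ≤ count) (h2 : x ≤ c0) :
    bLoop x (f + 1) ((v0, c0) :: rest) count =
      bLoop x f
        (if (PySem.Int.floordiv c0 x) * x = c0 then rest
          else (v0, c0 - (PySem.Int.floordiv c0 x) * x) :: rest)
        (count - (PySem.Int.floordiv c0 x) * x) := by
  simp only [bLoop]
  rw [if_pos h1, if_pos h2]

theorem bLoop_pivot (x : Int) (f : Nat) (v0 c0 : Int) (rest : List (Int × Int)) (count : Int)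
    (h1 : x ≤ count) (h2 : ¬ x ≤ c0) :
    bLoop x (f + 1) ((v0, c0) :: rest) count =
      bLoop x f
        (mergeGroups ((splitPivot x ((v0, c0) :: rest)).1.map
            (fun g => (g.1 - (splitPivot x ((v0, c0) :: rest)).2.1, g.2)))
          (splitPivot x ((v0, c0) :: rest)).2.2.2)
        (count - (splitPivot x ((v0, c0) :: rest)).2.2.1) := by
  simp only [bLoop]
  rw [if_pos h1, if_neg h2]

-- batch-branch bookkeeping, shared by main_eq and cons_eq
theorem batch_pres (x : Int) (hx : 1 ≤ x) (v0 c0 : Int) (rest : List (Int × Int))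
    (hg : GoodG ((v0, c0) :: rest)) (hxc : x ≤ c0) :
    1 ≤ PySem.Int.floordiv c0 x ∧ (PySem.Int.floordiv c0 x) * x ≤ c0 ∧
      GoodG (if (PySem.Int.floordiv c0 x) * x = c0 then rest
        else (v0, c0 - (PySem.Int.floordiv c0 x) * x) :: rest) ∧
      cntG (if (PySem.Int.floordiv c0 x) * x = c0 then rest
        else (v0, c0 - (PySem.Int.floordiv c0 x) * x) :: rest) =
        cntG ((v0, c0) :: rest) - (PySem.Int.floordiv c0 x) * x ∧
      gvalG ((v0, c0) :: rest) - gvalG (if (PySem.Int.floordiv c0 x) * x = c0 then rest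
        else (v0, c0 - (PySem.Int.floordiv c0 x) * x) :: rest) =
        (PySem.Int.floordiv c0 x) * x * v0 ∧
      decodeG (if (PySem.Int.floordiv c0 x) * x = c0 then rest
        else (v0, c0 - (PySem.Int.floordiv c0 x) * x) :: rest) =
        List.replicate (c0 - (PySem.Int.floordiv c0 x) * x).toNat v0 ++ decodeG rest := by
  have hx0 : (0 : Int) < x := by omega
  set q := PySem.Int.floordiv c0 x with hq
  have hqe : q = c0 / x := by rw [hq, PySem.Int.floordiv_eq_ediv_of_pos hx0]
  have hdm := Int.mul_ediv_add_emod c0 x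
  have hr0 : 0 ≤ c0 % x := Int.emod_nonneg c0 (by omega)
  have hrx : c0 % x < x := Int.emod_lt_of_pos c0 hx0
  set r := c0 % x with hrdef
  have hqx : q * x = c0 - r := by rw [hqe, mul_comm]; omega
  have hq1 : 1 ≤ q := by rw [hqe]; exact (Int.le_ediv_iff_mul_le hx0).mpr (by omega)
  have hqxle : q * x ≤ c0 := by linarith
  obtain ⟨hgp, hgc⟩ := hg
  obtain ⟨hh, htp⟩ := List.pairwise_cons.mp hgp
  have hrest_c : ∀ g ∈ rest, 1 ≤ g.2 := fun g hg2 => hgc g (by simp [hg2])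
  refine ⟨hq1, hqxle, ?_, ?_, ?_, ?_⟩
  · by_cases he : q * x = c0
    · rw [if_pos he]
      exact ⟨htp, hrest_c⟩
    · rw [if_neg he]
      refine ⟨List.pairwise_cons.mpr ⟨?_, htp⟩, ?_⟩
      · intro g hg2
        exact hh g hg2
      · intro g hg2
        rcases List.mem_cons.mp hg2 with rfl | hg2
        · dsimp only
          have hr1 : c0 - q * x = r := by linarith
          have hrne : r ≠ 0 := by
            intro h0
            exact he (by linarith)
          omega
        · exact hrest_c g hg2
  · by_cases he : q * x = c0
    · rw [if_pos he, cntG_cons, he]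
      ring
    · rw [if_neg he, cntG_cons, cntG_cons]
      ring
  · by_cases he : q * x = c0
    · rw [if_pos he, gvalG_cons, ← he]
      ring
    · rw [if_neg he, gvalG_cons, gvalG_cons]
      ring
  · by_cases he : q * x = c0
    · rw [if_pos he]
      rw [show (c0 - q * x).toNat = 0 from by rw [he]; omega]
      simp
    · rw [if_neg he, decodeG_cons]

theorem main_eq (x : Int) (hx : 1 ≤ x) : ∀ (N : Nat), ∀ (gs : List (Int × Int)) (f fb : Nat) (acc : Int),
    GoodG gs → cntG gs = (N : Int) → N < f → N < fb →
    refLoop x f (decodeG gs) acc = bAcc x fb gs (N : Int) acc := by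
  intro N
  induction N using Nat.strong_induction_on with
  | _ N ih =>
    intro gs f fb acc hg hc hf hfb
    rcases f with _ | f
    · omega
    rcases fb with _ | fb
    · omega
    rcases gs with _ | ⟨⟨v0, c0⟩, rest⟩
    · have hN : N = 0 := by
        rw [show cntG [] = 0 from rfl] at hc
        omega
      subst hN
      rw [show decodeG [] = ([] : List Int) from rfl,
        show refLoop x (f + 1) [] acc = acc from by simp [refLoop],
        bAcc_exit x fb [] _ acc (by push_cast; omega)]
      simp [hd0G]
    · have hc0 : 1 ≤ c0 := hg.2 (v0, c0) (by simp)
      have hrestc : ∀ g ∈ rest, 1 ≤ g.2 := fun g h => hg.2 g (by simp [h])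
      have hcrest : 0 ≤ cntG rest := cntG_nonneg rest hrestc
      have hcnt : cntG ((v0, c0) :: rest) = c0 + cntG rest := cntG_cons _ _
      have hlend : (((decodeG ((v0, c0) :: rest)).length : Nat) : Int) = (N : Int) := by
        rw [len_decodeG _ hg.2, hc]
      by_cases hxN : x ≤ (N : Int)
      · by_cases hxc : x ≤ c0
        · -- batched rounds on a run of the maximum
          obtain ⟨hq1, hqxle, hgood', hcnt', hgval', hdec'⟩ := batch_pres x hx v0 c0 rest hg hxc
          set q := PySem.Int.floordiv c0 x with hqdef
          set gs' := (if q * x = c0 then rest else (v0, c0 - q * x) :: rest) with hgs'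
          have hq0 : (0 : Int) ≤ q := by omega
          have hqq : ((q.toNat : Nat) : Int) = q := by omega
          have hqle : q ≤ q * x := le_mul_of_one_le_right hq0 hx
          have hqx0 : (0 : Int) ≤ q * x := by linarith
          have hqx1 : (1 : Int) ≤ q * x := by nlinarith
          have h1 : (0 : Int) ≤ cntG gs' := cntG_nonneg gs' hgood'.2
          rw [hcnt', hc] at h1
          have hqxN : q * x ≤ (N : Int) := by linarith
          have hqxt : (((q * x).toNat : Nat) : Int) = q * x := Int.toNat_of_nonneg hqx0
          have hqxtN : (q * x).toNat ≤ N := by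
            have : (((q * x).toNat : Nat) : Int) ≤ (N : Int) := by rw [hqxt]; exact hqxN
            exact_mod_cast this
          have hqxt1 : 1 ≤ (q * x).toNat := by
            have : (1 : Int) ≤ (((q * x).toNat : Nat) : Int) := by rw [hqxt]; exact hqx1
            exact_mod_cast this
          have hqtle : q.toNat ≤ (q * x).toNat := by
            have : ((q.toNat : Nat) : Int) ≤ (((q * x).toNat : Nat) : Int) := by
              rw [hqq, hqxt]; exact hqle
            exact_mod_cast this
          set N' := N - (q * x).toNat with hN'def
          have hN'cast : ((N' : Nat) : Int) = (N : Int) - q * x := by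
            rw [hN'def]
            push_cast [hqxtN]
            rw [hqxt]
          have hN'lt : N' < N := by omega
          rw [decodeG_cons]
          rw [ref_batch x hx v0 (decodeG rest) q.toNat (f + 1) c0 acc
            (by rw [hqq]; exact hqxle) (by omega)]
          rw [hqq, ← hdec']
          rw [bAcc_batch x fb v0 c0 rest (N : Int) acc hxN hxc]
          rw [← hqdef, ← hgs']
          have hcnt'' : cntG gs' = ((N' : Nat) : Int) := by rw [hcnt', hc, hN'cast]
          have hstep := ih N' hN'lt gs' (f + 1 - q.toNat) fb (acc + q * v0) hgood' hcnt''
            (by omega) (by omega)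
          rw [hstep, hN'cast]
        · -- pivot round
          have hxcnt : x ≤ cntG ((v0, c0) :: rest) := by rw [hc]; exact hxN
          obtain ⟨hgood', hcnt', hk1, hkx, hgval', hdgs, hdgs', hcntab, habm⟩ :=
            pivot_pres x hx ((v0, c0) :: rest) hg hxcnt
          set ab := (splitPivot x ((v0, c0) :: rest)).1 with habdef
          set m := (splitPivot x ((v0, c0) :: rest)).2.1 with hmdef
          set k := (splitPivot x ((v0, c0) :: rest)).2.2.1 with hkdef
          set rst := (splitPivot x ((v0, c0) :: rest)).2.2.2 with hrstdef
          set gs' := mergeGroups (ab.map (fun g => (g.1 - m, g.2))) rst with hgs'def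
          have habc : ∀ g ∈ ab, 1 ≤ g.2 := fun g h => (habm g h).2
          have hlenab : (((decodeG ab).length : Nat) : Int) = x - k := by
            rw [len_decodeG ab habc, hcntab]
          have hkN : k ≤ (N : Int) := le_trans hkx hxN
          have hkt : ((k.toNat : Nat) : Int) = k := by omega
          set N' := N - k.toNat with hN'def
          have hktN : k.toNat ≤ N := by omega
          have hN'cast : ((N' : Nat) : Int) = (N : Int) - k := by
            rw [hN'def]
            push_cast [hktN]
            omega
          have hN'lt : N' < N := by omega
          have hvne : decodeG ((v0, c0) :: rest) ≠ [] := by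
            intro h
            rw [h] at hlend
            simp at hlend
            omega
          have hnlt : ¬ (((decodeG ((v0, c0) :: rest)).length : Int) < x) := by
            rw [hlend]
            omega
          set n := x.toNat with hn
          have hlab : (decodeG ab).length = (x - k).toNat := by omega
          have hm_ref : (decodeG ((v0, c0) :: rest)).getD (n - 1) 0 = m := by
            rw [hdgs, List.append_assoc, List.getD_eq_getElem?_getD,
              List.getElem?_append_right (by rw [hlab]; omega),
              List.getElem?_append_left (by rw [List.length_replicate, hlab]; omega),
              List.getElem?_replicate, if_pos (by rw [hlab]; omega)]
            rfl
          have htake : (decodeG ((v0, c0) :: rest)).take n =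
              decodeG ab ++ List.replicate k.toNat m := by
            rw [hdgs, List.append_assoc, List.take_append,
              List.take_of_length_le (by rw [hlab]; omega), List.take_append,
              List.take_of_length_le (by rw [List.length_replicate, hlab]; omega),
              List.length_replicate, hlab,
              show n - (x - k).toNat - k.toNat = 0 from by omega, List.take_zero,
              List.append_nil]
          have hdrop : (decodeG ((v0, c0) :: rest)).drop n = decodeG rst := by
            rw [hdgs, List.append_assoc, List.drop_append,
              List.drop_of_length_le (by rw [hlab]; omega), List.drop_append,
              List.drop_of_length_le (by rw [List.length_replicate, hlab]; omega),
              List.length_replicate, hlab,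
              show n - (x - k).toNat - k.toNat = 0 from by omega, List.drop_zero,
              List.nil_append, List.nil_append]
          have hfilter : ((decodeG ((v0, c0) :: rest)).take n).filter
              (fun u => decide (0 < u - m)) = decodeG ab := by
            rw [htake, List.filter_append, filter_replicate_not, List.append_nil,
              List.filter_eq_self.mpr ?_]
            intro u hu
            obtain ⟨g, hgmem, rfl⟩ := mem_decodeG ab u hu
            have := (habm g hgmem).1
            simp
            omega
          show (if decodeG ((v0, c0) :: rest) = [] then acc else
            if ((decodeG ((v0, c0) :: rest)).length : Int) < x then
              acc + (decodeG ((v0, c0) :: rest)).headI else _) = _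
          rw [if_neg hvne, if_neg hnlt]
          simp only [← hn]
          simp only [hm_ref, hfilter, hdrop]
          rw [← hdgs']
          rw [bAcc_pivot x fb v0 c0 rest (N : Int) acc hxN hxc, ← hmdef, ← hkdef, ← hrstdef,
            ← habdef, ← hgs'def]
          have hcnt'' : cntG gs' = ((N' : Nat) : Int) := by
            rw [hgs'def, hcnt', hc, hN'cast]
          have hstep := ih N' hN'lt gs' f fb (acc + m) hgood' hcnt'' (by omega) (by omega)
          rw [hstep, hN'cast]
      · -- loop exit: fewer than x elements remain
        obtain ⟨t', ht'⟩ := decodeG_head v0 c0 rest hc0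
        have hvne : decodeG ((v0, c0) :: rest) ≠ [] := by rw [ht']; simp
        have hlt : ((decodeG ((v0, c0) :: rest)).length : Int) < x := by
          rw [hlend]; omega
        show (if decodeG ((v0, c0) :: rest) = [] then acc else
          if ((decodeG ((v0, c0) :: rest)).length : Int) < x then
            acc + (decodeG ((v0, c0) :: rest)).headI else _) = _
        rw [if_neg hvne, if_pos hlt, bAcc_exit x fb _ _ acc hxN, ht']
        simp [hd0G]

-- ---------- sum conservation: bAcc's total from bLoop's residual ----------
theorem cons_eq (x : Int) (hx : 1 ≤ x) : ∀ (f : Nat) (gs : List (Int × Int)) (count acc : Int),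
    GoodG gs → cntG gs = count →
    x * (bAcc x f gs count acc - acc - hd0G (bLoop x f gs count)) =
      gvalG gs - gvalG (bLoop x f gs count) := by
  intro f
  induction f with
  | zero =>
    intro gs count acc _ _
    simp only [bAcc, bLoop]
    ring
  | succ f ih =>
    intro gs count acc hg hc
    by_cases hxcount : x ≤ count
    · rcases gs with _ | ⟨⟨v0, c0⟩, rest⟩
      · exfalso
        rw [show cntG [] = 0 from rfl] at hc
        omega
      · by_cases hxc : x ≤ c0
        · obtain ⟨hq1, hqxle, hgood', hcnt', hgval', hdec'⟩ := batch_pres x hx v0 c0 rest hg hxc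
          rw [bAcc_batch x f v0 c0 rest count acc hxcount hxc,
            bLoop_batch x f v0 c0 rest count hxcount hxc]
          have hIH := ih (if (PySem.Int.floordiv c0 x) * x = c0 then rest
              else (v0, c0 - (PySem.Int.floordiv c0 x) * x) :: rest)
            (count - (PySem.Int.floordiv c0 x) * x)
            (acc + (PySem.Int.floordiv c0 x) * v0) hgood' (by rw [hcnt', hc])
          linear_combination hIH - hgval'
        · have hxcnt : x ≤ cntG ((v0, c0) :: rest) := by rw [hc]; exact hxcount
          obtain ⟨hgood', hcnt', hk1, hkx, hgval', hdgs, hdgs', hcntab, habm⟩ :=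
            pivot_pres x hx ((v0, c0) :: rest) hg hxcnt
          rw [bAcc_pivot x f v0 c0 rest count acc hxcount hxc,
            bLoop_pivot x f v0 c0 rest count hxcount hxc]
          have hIH := ih (mergeGroups ((splitPivot x ((v0, c0) :: rest)).1.map
              (fun g => (g.1 - (splitPivot x ((v0, c0) :: rest)).2.1, g.2)))
              (splitPivot x ((v0, c0) :: rest)).2.2.2)
            (count - (splitPivot x ((v0, c0) :: rest)).2.2.1)
            (acc + (splitPivot x ((v0, c0) :: rest)).2.1) hgood' (by rw [hcnt', hc])
          linear_combination hIH - hgval'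
    · rw [bAcc_exit x f gs count acc hxcount, bLoop_exit x f gs count hxcount]
      ring

-- the empty-list case, shared by both branches below
theorem karl_nil (numberOfModels x : Int) :
    Karl numberOfModels x [] = Karl_alt numberOfModels x [] := by
  have hs : PySem.List.sorted ([] : List Int) (fun v => v) true = [] :=
    (PySem.List.sorted_eq_nil_iff _ _ _).mpr rfl
  unfold Karl Karl_alt
  rw [hs]
  simp [karlLoop]

-- ===== VERDICT (by name: the statement is the Claim_ definition above) =====
theorem Karl_spec : Claim_equal_Karl := by
  intro numberOfModels x cars _hdom hpre
  unfold Spec_Karl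
  rcases hpre with hnil | hx
  · subst hnil
    exact karl_nil numberOfModels x
  · rcases hsd : PySem.List.sorted cars (fun v => v) true with _ | ⟨v, vs⟩
    · have hcars : cars = [] := (PySem.List.sorted_eq_nil_iff _ _ _).mp hsd
      subst hcars
      exact karl_nil numberOfModels x
    · have hperm0 := PySem.List.sorted_perm cars (fun v => v) true
      rw [hsd] at hperm0
      have hpair : (v :: vs).Pairwise (fun a b : Int => b ≤ a) := by
        have := PySem.List.sorted_pairwise_rev cars (fun v => v)
        rw [hsd] at this
        simpa using this
      obtain ⟨hvsle, hvsp⟩ := List.pairwise_cons.mp hpair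
      obtain ⟨hgood0, hdec0, _⟩ := rle_spec vs v 1 (by norm_num) hvsle hvsp
      have hdec0' : decodeG (rleAux v 1 vs) = v :: vs := by
        rw [hdec0]
        norm_num
      set N := cars.length with hN
      have hlen_sd : (v :: vs).length = N := by
        have := hperm0.length_eq
        rw [hN]
        omega
      have hcnt0 : cntG (rleAux v 1 vs) = (N : Int) := by
        have hl := len_decodeG _ hgood0.2
        rw [hdec0'] at hl
        rw [← hl, hlen_sd]
      unfold Karl
      have hA := loop_eq x hx (N + 1) (cars.map (fun c => -c)) (v :: vs) 0
        ((hperm0.map (fun u => -u)).symm) hpair (by omega)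
      rw [hA]
      have hB := main_eq x hx N (rleAux v 1 vs) (N + 1) (N + 1) 0 hgood0 hcnt0
        (by omega) (by omega)
      rw [hdec0'] at hB
      rw [hB]
      unfold Karl_alt
      rw [hsd]
      set gs0 := rleAux v 1 vs with hgs0
      set res := bLoop x (N + 1) gs0 (N : Int) with hres
      have hcons := cons_eq x hx (N + 1) gs0 (N : Int) 0 hgood0 hcnt0
      rw [← hres] at hcons
      have hsum : cars.sum = gvalG gs0 := by
        have h1 : (v :: vs).sum = cars.sum := hperm0.sum_eq
        have h2 := sum_decodeG gs0 hgood0.2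
        rw [hdec0'] at h2
        rw [← h1]
        exact h2
      have hgv : (res.map (fun g => g.1 * g.2)).sum = gvalG res := rfl
      have hhd : (match res with | [] => (0 : Int) | g :: _ => g.1) = hd0G res := by
        cases res <;> rfl
      show _ = PySem.Int.floordiv (cars.sum - (res.map (fun g => g.1 * g.2)).sum) x +
        (match res with | [] => (0 : Int) | g :: _ => g.1)
      rw [hgv, hhd, hsum]
      rw [show gvalG gs0 - gvalG res =
          x * (bAcc x (N + 1) gs0 (N : Int) 0 - hd0G res) from by linarith [hcons]]
      rw [PySem.Int.floordiv_eq_ediv_of_pos (by omega),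
        Int.mul_ediv_cancel_left _ (by omega : x ≠ 0)]
      ring
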